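-- pv_equiv track=rewrite | github.com/pypi-data/pypi-mirror-377 | packages/cce/cce-0.2.3.tar.gz/cce-0.2.3/src/metrics/basic_metrics.py | convert_vector_to_events
-- ===== SOURCE A (Python) =====
-- from itertools import groupby
-- from operator import itemgetter
--
-- def convert_vector_to_events(vector):
--     """
--     Convert a binary vector (indicating 1 for the anomalous instances)
--     to a list of events. The events are considered as durations,
--     i.e. setting 1 at index i corresponds to an anomalous interval [i, i+1).
--
--     :param vector: a list of elements belonging to {0, 1}
--     :return: a list of couples, each couple representing the start and stop of
--     each event
--     """
--     positive_indexes = [idx for idx, val in enumerate(vector) if val > 0]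
--     events = []
--     for k, g in groupby(enumerate(positive_indexes), lambda ix : ix[0] - ix[1]):
--         cur_cut = list(map(itemgetter(1), g))
--         events.append((cur_cut[0], cur_cut[-1]))
--
--     # Consistent conversion in case of range anomalies (for indexes):
--     # A positive index i is considered as the interval [i, i+1),
--     # so the last index should be moved by 1
--     events = [(x, y+1) for (x,y) in events]
--
--     return (events)
-- ===== SOURCE B (Python) =====
-- def convert_vector_to_events(vector):
--     events = []
--     start = None
--     for i, v in enumerate(vector):
--         if v > 0:
--             if start is None:
--                 start = i
--         elif start is not None:
--             events.append((start, i))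
--             start = None
--     if start is not None:
--         events.append((start, len(vector)))
--     return events
-- ===== Notes on version B (the rewrite author's own statement) =====
-- stated objective: simpler
-- what changed: Replaces the positive-index list plus itertools.groupby-on-(index-position) grouping with a direct single-pass scan tracking an open run start, avoiding the intermediate index/group lists.
import Mathlib
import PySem

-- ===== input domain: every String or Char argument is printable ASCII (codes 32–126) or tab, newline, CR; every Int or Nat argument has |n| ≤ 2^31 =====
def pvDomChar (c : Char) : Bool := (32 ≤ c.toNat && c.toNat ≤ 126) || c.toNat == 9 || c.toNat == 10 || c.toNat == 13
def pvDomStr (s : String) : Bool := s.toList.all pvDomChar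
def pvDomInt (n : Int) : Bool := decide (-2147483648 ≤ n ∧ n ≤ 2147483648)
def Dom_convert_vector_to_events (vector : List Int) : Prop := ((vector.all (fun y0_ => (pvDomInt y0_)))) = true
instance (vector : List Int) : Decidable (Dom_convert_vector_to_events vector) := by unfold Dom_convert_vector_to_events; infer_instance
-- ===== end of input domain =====

-- B replaces A's positive-index list + groupby-on-(index−position) with a direct single-pass
-- run-detecting scan (objective: simpler); same return value on every input.

-- ===== PORT A =====
-- itertools.groupby(ys, key = fun p => p.1 - p.2): maximal runs of equal key, in order.
def pvGroupBy : List (Int × Int) → List (List (Int × Int))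
  | [] => []
  | x :: xs =>
    match pvGroupBy xs with
    | (y :: ys) :: gs =>
      if x.1 - x.2 = y.1 - y.2 then (x :: y :: ys) :: gs else [x] :: (y :: ys) :: gs
    | gs => [x] :: gs

def convert_vector_to_events (vector : List Int) : List (Int × Int) :=
  let positive_indexes := ((PySem.List.enumerate vector).filter (fun p => p.2 > 0)).map (·.1)
  -- every group produced by groupby is nonempty, so cur_cut[0] / cur_cut[-1] never raise;
  -- ported as headD 0 / getLastD 0.
  let events := (pvGroupBy (PySem.List.enumerate positive_indexes)).foldl
    (fun events g =>
      let cur_cut := g.map (·.2)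
      events ++ [(cur_cut.headD 0, cur_cut.getLastD 0)]) []
  events.map (fun p => (p.1, p.2 + 1))

-- ===== PORT B =====
def pvStepB (s : List (Int × Int) × Option Int) (p : Int × Int) : List (Int × Int) × Option Int :=
  if p.2 > 0 then
    match s.2 with
    | none => (s.1, some p.1)
    | some _ => s
  else
    match s.2 with
    | some a => (s.1 ++ [(a, p.1)], none)
    | none => s

def convert_vector_to_events_alt (vector : List Int) : List (Int × Int) :=
  let st := (PySem.List.enumerate vector).foldl pvStepB ([], none)
  match st.2 with
  | none => st.1
  | some a => st.1 ++ [(a, (vector.length : Int))]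

-- ===== PRECONDITION & SPEC =====
def Spec_convert_vector_to_events (vector : List Int) (out : List (Int × Int)) : Prop := out = convert_vector_to_events_alt vector
instance (vector : List Int) (out : List (Int × Int)) : Decidable (Spec_convert_vector_to_events vector out) := by unfold Spec_convert_vector_to_events; infer_instance

-- ===== CLAIM (what is proved, stated in full; the proofs are below) =====
def Claim_equal_convert_vector_to_events : Prop := ∀ (vector : List Int), Dom_convert_vector_to_events vector → Spec_convert_vector_to_events vector (convert_vector_to_events vector)

-- ===== LEMMAS AND PROOFS =====

-- reference function: the runs of positive entries, with an optionally open run start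
def pvRuns : Option Int → Int → List Int → List (Int × Int)
  | none, _, [] => []
  | some s, i, [] => [(s, i)]
  | none, i, v :: vs => if v > 0 then pvRuns (some i) (i + 1) vs else pvRuns none (i + 1) vs
  | some s, i, v :: vs => if v > 0 then pvRuns (some s) (i + 1) vs else (s, i) :: pvRuns none (i + 1) vs

def pvPosIdx (k : Int) (l : List Int) : List Int :=
  ((PySem.List.enumerate l k).filter (fun p => p.2 > 0)).map (·.1)

def pvGroupConsec : List Int → List (List Int)
  | [] => []
  | x :: xs =>
    match pvGroupConsec xs with
    | (y :: ys) :: gs => if y = x + 1 then (x :: y :: ys) :: gs else [x] :: (y :: ys) :: gs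
    | gs => [x] :: gs

def pvFmt (g : List Int) : Int × Int := (g.headD 0, g.getLastD 0 + 1)

lemma pvPosIdx_nil (k : Int) : pvPosIdx k [] = [] := rfl

lemma pvPosIdx_cons (k v : Int) (vs : List Int) :
    pvPosIdx k (v :: vs) = if v > 0 then k :: pvPosIdx (k + 1) vs else pvPosIdx (k + 1) vs := by
  simp [pvPosIdx, PySem.List.enumerate_cons, List.filter_cons]
  split <;> simp

-- pvGroupBy on an enumerated list corresponds to pvGroupConsec on the underlying list
lemma pvGroupBy_enumerate (xs : List Int) : ∀ j : Int,
    ((pvGroupBy (PySem.List.enumerate xs j)).map (fun g => g.map (·.2)) = pvGroupConsec xs) ∧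
    (∀ x xs', xs = x :: xs' → ∃ E GS, pvGroupBy (PySem.List.enumerate xs j) = ((j, x) :: E) :: GS) := by
  induction xs with
  | nil =>
    intro j
    refine ⟨rfl, ?_⟩
    intro x xs' h
    cases h
  | cons x xs ih =>
    intro j
    cases xs with
    | nil =>
      constructor
      · simp [PySem.List.enumerate_cons, PySem.List.enumerate_nil, pvGroupBy, pvGroupConsec]
      · intro y ys h
        cases h
        exact ⟨[], [], by simp [PySem.List.enumerate_cons, PySem.List.enumerate_nil, pvGroupBy]⟩
    | cons x' xs'' =>
      obtain ⟨E, GS, hE⟩ := (ih (j + 1)).2 x' xs'' rfl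
      have h1 := (ih (j + 1)).1
      rw [hE] at h1
      have key : pvGroupBy (PySem.List.enumerate (x :: x' :: xs'') j)
          = if x' = x + 1 then ((j, x) :: (j + 1, x') :: E) :: GS
            else [(j, x)] :: ((j + 1, x') :: E) :: GS := by
        rw [PySem.List.enumerate_cons]
        by_cases hc : x' = x + 1
        · have hc' : j - x = j + 1 - x' := by omega
          simp only [pvGroupBy, hE, if_pos hc]
          simp [hc']
        · have hc' : ¬ (j - x = j + 1 - x') := by omega
          simp only [pvGroupBy, hE, if_neg hc]
          simp [hc']
      have keyC : pvGroupConsec (x :: x' :: xs'')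
          = if x' = x + 1 then (x :: x' :: E.map (·.2)) :: GS.map (fun g => g.map (·.2))
            else [x] :: (x' :: E.map (·.2)) :: GS.map (fun g => g.map (·.2)) := by
        conv_lhs => rw [pvGroupConsec, ← h1]
        by_cases hc : x' = x + 1
        · simp [hc]
        · simp [hc]
      constructor
      · rw [key, keyC]
        by_cases hc : x' = x + 1 <;> simp [hc]
      · intro y ys h
        cases h
        by_cases hc : x' = x + 1
        · exact ⟨(j + 1, x') :: E, GS, by rw [key]; simp [hc]⟩
        · exact ⟨[], ((j + 1, x') :: E) :: GS, by rw [key]; simp [hc]⟩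

lemma pvRuns_some_head (l : List Int) : ∀ s i : Int, ∃ b rest, pvRuns (some s) i l = (s, b) :: rest := by
  induction l with
  | nil => exact fun s i => ⟨i, [], rfl⟩
  | cons v vs ih =>
    intro s i
    by_cases hv : v > 0
    · simpa [pvRuns, hv] using ih s (i + 1)
    · exact ⟨i, pvRuns none (i + 1) vs, by simp [pvRuns, hv]⟩

lemma pvRuns_none_start (l : List Int) : ∀ (i a b : Int) (rest : List (Int × Int)),
    pvRuns none i l = (a, b) :: rest → i ≤ a := by
  induction l with
  | nil => intro i a b rest h; simp [pvRuns] at h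
  | cons v vs ih =>
    intro i a b rest h
    by_cases hv : v > 0
    · simp only [pvRuns, if_pos hv] at h
      obtain ⟨b', rest', h'⟩ := pvRuns_some_head vs i (i + 1)
      rw [h'] at h
      injection h with h1 _
      injection h1 with h1 _
      omega
    · simp only [pvRuns, if_neg hv] at h
      have := ih (i + 1) a b rest h
      omega

lemma pvRuns_link (l : List Int) : ∀ s i : Int,
    pvRuns (some s) i l =
      (match pvRuns none i l with
       | [] => [(s, i)]
       | (a, b) :: rest => if a = i then (s, b) :: rest else (s, i) :: (a, b) :: rest) := by
  induction l with
  | nil => intro s i; simp [pvRuns]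
  | cons v vs ih =>
    intro s i
    by_cases hv : v > 0
    · simp only [pvRuns, if_pos hv]
      rw [ih s (i + 1), ih i (i + 1)]
      cases h : pvRuns none (i + 1) vs with
      | nil => simp
      | cons p rest =>
        obtain ⟨a, b⟩ := p
        by_cases ha : a = i + 1 <;> simp [ha]
    · simp only [pvRuns, if_neg hv]
      cases h : pvRuns none (i + 1) vs with
      | nil => simp
      | cons p rest =>
        obtain ⟨a, b⟩ := p
        have hle := pvRuns_none_start vs (i + 1) a b rest h
        have hne : ¬ (a = i) := by omega
        simp [hne]

lemma pvGroupConsec_head_ne_nil (xs : List Int) (gs : List (List Int)) :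
    pvGroupConsec xs = [] :: gs → False := by
  cases xs with
  | nil => simp [pvGroupConsec]
  | cons x xs =>
    unfold pvGroupConsec
    split <;> intro h <;> (try split_ifs at h) <;> simp_all

lemma pvGroupConsec_runs (l : List Int) : ∀ k : Int,
    (pvGroupConsec (pvPosIdx k l)).map pvFmt = pvRuns none k l := by
  induction l with
  | nil => intro k; simp [pvPosIdx_nil, pvGroupConsec, pvRuns]
  | cons v vs ih =>
    intro k
    rw [pvPosIdx_cons]
    by_cases hv : v > 0
    · rw [if_pos hv]
      have hR : pvRuns none k (v :: vs) = pvRuns (some k) (k + 1) vs := by simp [pvRuns, hv]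
      rw [hR, pvRuns_link, ← ih (k + 1)]
      cases hG : pvGroupConsec (pvPosIdx (k + 1) vs) with
      | nil => simp only [pvGroupConsec, hG]; simp [pvFmt]
      | cons g gs =>
        cases g with
        | nil => exact (pvGroupConsec_head_ne_nil _ _ hG).elim
        | cons y ys =>
          by_cases hy : y = k + 1
          · simp only [pvGroupConsec, hG]
            simp [pvFmt, hy]
          · simp only [pvGroupConsec, hG]
            simp [pvFmt, hy]
    · rw [if_neg hv]
      have hR : pvRuns none k (v :: vs) = pvRuns none (k + 1) vs := by simp [pvRuns, hv]
      rw [hR, ih (k + 1)]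

lemma pvFoldlApp (gs : List (List (Int × Int))) : ∀ acc : List (Int × Int),
    gs.foldl (fun events g =>
      let cur_cut := g.map (·.2)
      events ++ [(cur_cut.headD 0, cur_cut.getLastD 0)]) acc
    = acc ++ gs.map (fun g =>
      let cur_cut := g.map (·.2)
      (cur_cut.headD 0, cur_cut.getLastD 0)) := by
  induction gs with
  | nil => intro acc; simp
  | cons g gs ih => intro acc; rw [List.foldl_cons, ih]; simp

lemma pvBInv (l : List Int) : ∀ (k : Int) (ev : List (Int × Int)) (st : Option Int),
    (match ((PySem.List.enumerate l k).foldl pvStepB (ev, st)).2 with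
     | none => ((PySem.List.enumerate l k).foldl pvStepB (ev, st)).1
     | some a => ((PySem.List.enumerate l k).foldl pvStepB (ev, st)).1 ++ [(a, k + (l.length : Int))])
    = ev ++ pvRuns st k l := by
  induction l with
  | nil =>
    intro k ev st
    cases st <;> simp [PySem.List.enumerate_nil, pvRuns]
  | cons v vs ih =>
    intro k ev st
    rw [PySem.List.enumerate_cons, List.foldl_cons]
    have hlen : k + (((v :: vs).length : Nat) : Int) = (k + 1) + ((vs.length : Nat) : Int) := by
      simp [List.length_cons]; ring
    cases st with
    | none =>
      by_cases hv : v > 0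
      · rw [show pvStepB (ev, none) (k, v) = (ev, some k) by simp [pvStepB, hv], hlen, ih]
        simp [pvRuns, hv]
      · rw [show pvStepB (ev, none) (k, v) = (ev, none) by simp [pvStepB, hv], hlen, ih]
        simp [pvRuns, hv]
    | some a =>
      by_cases hv : v > 0
      · rw [show pvStepB (ev, some a) (k, v) = (ev, some a) by simp [pvStepB, hv], hlen, ih]
        simp [pvRuns, hv]
      · rw [show pvStepB (ev, some a) (k, v) = (ev ++ [(a, k)], none) by simp [pvStepB, hv], hlen, ih]
        simp [pvRuns, hv]

-- ===== VERDICT (by name: the statement is the Claim_ definition above) =====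
theorem convert_vector_to_events_spec : Claim_equal_convert_vector_to_events := by
  intro vector _
  unfold Spec_convert_vector_to_events convert_vector_to_events convert_vector_to_events_alt
  have hPI : ((PySem.List.enumerate vector).filter (fun p => p.2 > 0)).map (·.1)
      = pvPosIdx 0 vector := rfl
  have h1 := (pvGroupBy_enumerate (pvPosIdx 0 vector) 0).1
  have h3 := pvBInv vector 0 [] none
  rw [List.nil_append] at h3
  simp only [hPI]
  rw [pvFoldlApp, List.nil_append]
  have hcomp : ((pvGroupBy (PySem.List.enumerate (pvPosIdx 0 vector))).map (fun g =>
        let cur_cut := g.map (·.2)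
        (cur_cut.headD 0, cur_cut.getLastD 0))).map (fun p => (p.1, p.2 + 1))
      = ((pvGroupBy (PySem.List.enumerate (pvPosIdx 0 vector))).map (fun g => g.map (·.2))).map pvFmt := by
    simp [List.map_map, pvFmt, Function.comp]
  rw [hcomp, h1, pvGroupConsec_runs vector 0, ← h3]
  simp
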